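-- pv_equiv track=rewrite | github.com/jslyemath/mat-106-bank | outcomes/slye_math.py | to_simple_babylonian
-- ===== SOURCE A (Python) =====
-- def base_conv_list(original_int, base):
--     # https://stackoverflow.com/questions/2267362/how-to-convert-an-integer-to-a-string-in-any-base
--     if original_int == 0:
--         return [0]
--     digits = []
--     while original_int:
--         digits.append(int(original_int % base))
--         original_int //= base
--     return digits[::-1]
--
-- def to_simple_babylonian(num):
--     base_60 = base_conv_list(num, 60)
--
--     bab_python_zero = '\U000120F5'
--
--     bab_python = ('\U00012079', '\U0001230B')
--
--     babylonian = ''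
--
--     for index, value in enumerate(base_60):
--         if index != 0:
--             babylonian += '\u2003'
--         if value == 0 and index != 0:
--             babylonian += bab_python_zero
--         else:
--             current_numeral = ''
--             rev_digits = str(value)[::-1]
--             for ten_power, digit in enumerate(rev_digits):
--                 digit = int(digit)
--                 for i in range(0, digit):
--                     current_numeral += bab_python[ten_power]
--             babylonian += current_numeral[::-1]
--
--     return babylonian
-- ===== SOURCE B (Python) =====
-- def to_simple_babylonian(num):
--     ZERO = '\U000120F5'
--     UNIT, TEN = '\U00012079', '\U0001230B'
--     if num == 0:
--         return ''
--     digits = []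
--     n = num
--     while n:
--         n, d = divmod(n, 60)
--         digits.append(d)
--     parts = []
--     for i, d in enumerate(reversed(digits)):
--         if d == 0 and i != 0:
--             parts.append(ZERO)
--         else:
--             tens, units = divmod(d, 10)
--             parts.append(TEN * tens + UNIT * units)
--     return '\u2003'.join(parts)
-- ===== Notes on version B (the rewrite author's own statement) =====
-- stated objective: simpler
-- what changed: Replaces the per-place decimal-string reversal with nested glyph-appending loops (str(value)[::-1], per-digit range loop, final current_numeral[::-1]) by arithmetic divmod(d,10) with string repetition, and replaces the index-guarded separator accumulation by building a list of place strings joined with the separator; the base-60 digit extraction stays a divmod loop.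
import Mathlib
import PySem

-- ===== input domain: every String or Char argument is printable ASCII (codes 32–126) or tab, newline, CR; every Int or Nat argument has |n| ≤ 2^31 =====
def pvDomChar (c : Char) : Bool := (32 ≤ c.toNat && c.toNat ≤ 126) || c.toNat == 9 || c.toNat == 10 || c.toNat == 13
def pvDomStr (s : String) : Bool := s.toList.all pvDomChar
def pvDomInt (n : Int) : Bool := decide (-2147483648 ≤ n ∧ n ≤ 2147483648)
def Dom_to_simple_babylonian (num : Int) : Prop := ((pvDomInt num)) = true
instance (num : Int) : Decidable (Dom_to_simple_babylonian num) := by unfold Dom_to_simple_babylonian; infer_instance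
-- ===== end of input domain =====

-- B replaces A's per-place decimal-string reversal machinery by divmod arithmetic with glyph
-- repetition, and the index-guarded separator accumulation by a join over a list of place strings
-- (objective: simpler). Both Pythons loop forever on negative input, excluded by Pre_.

-- ===== PORT A =====
-- the cuneiform glyphs (Python's '\U000120F5', '\U00012079', '\U0001230B')
def babZERO : Char := Char.ofNat 0x120F5
def babUNIT : Char := Char.ofNat 0x12079
def babTEN : Char := Char.ofNat 0x1230B

-- Python's `while original_int:` loop, fuel-bounded; exact for original_int ≥ 0 (Pre_):
-- n strictly shrinks by //60 each step, so fuel = n suffices; Python diverges for negatives.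
def bclLoop (fuel : Nat) (n : Nat) (base : Nat) (digits : List Int) : List Int :=
  match fuel with
  | 0 => digits
  | fuel + 1 =>
    if n = 0 then digits
    else bclLoop fuel (n / base) base (digits ++ [((n % base : Nat) : Int)])

def base_conv_list (original_int : Int) (base : Int) : List Int :=
  if original_int = 0 then [0]
  else (bclLoop original_int.toNat original_int.toNat base.toNat []).reverse  -- digits[::-1]

-- A's else-branch: str(value)[::-1], then per decimal digit append bab_python[ten_power]
-- digit-many times, then current_numeral[::-1].  int(c) on a decimal digit char is c.toNat - 48
-- (exact on the digits produced by str(value) for value ≥ 0); bab_python[ten_power] would raise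
-- IndexError for ten_power ≥ 2, unreachable since base-60 values have at most two decimal digits.
def aPiece (value : Int) : String :=
  let rev_digits := (PySem.Int.toStr value).toList.reverse
  let current :=
    (PySem.List.enumerate rev_digits).foldl (fun cur td =>
      (PySem.List.pyRange 0 ((td.2.toNat : Int) - 48) 1).foldl
        (fun c _ => c ++ String.ofList [if td.1 = 0 then babUNIT else babTEN]) cur) ""
  String.ofList current.toList.reverse

-- one iteration of A's main for-loop
def aStep (babylonian : String) (iv : Int × Int) : String :=
  let b := if iv.1 ≠ 0 then babylonian ++ "\u2003" else babylonian
  if iv.2 = 0 ∧ iv.1 ≠ 0 then b ++ String.ofList [babZERO] else b ++ aPiece iv.2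

def to_simple_babylonian (num : Int) : String :=
  (PySem.List.enumerate (base_conv_list num 60)).foldl aStep ""

-- ===== PORT B =====
-- B's `while n:` divmod loop, fuel-bounded exactly like A's (exact for num ≥ 0)
def altLoop (fuel : Nat) (n : Nat) (digits : List Int) : List Int :=
  match fuel with
  | 0 => digits
  | fuel + 1 =>
    if n = 0 then digits
    else altLoop fuel (n / 60) (digits ++ [((n % 60 : Nat) : Int)])

-- TEN * tens + UNIT * units (single-char glyphs, so repetition is List.replicate)
def bPiece (d : Int) : String :=
  let tens := PySem.Int.floordiv d 10
  let units := PySem.Int.mod d 10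
  String.ofList (List.replicate tens.toNat babTEN ++ List.replicate units.toNat babUNIT)

def to_simple_babylonian_alt (num : Int) : String :=
  if num = 0 then ""
  else
    -- parts built over enumerate(reversed(digits)), then '\u2003'.join(parts)
    PySem.Str.join "\u2003"
      ((PySem.List.enumerate ((altLoop num.toNat num.toNat []).reverse)).foldl (fun parts id =>
        parts ++ [if id.2 = 0 ∧ id.1 ≠ 0 then String.ofList [babZERO] else bPiece id.2]) [])

-- ===== PRECONDITION & SPEC =====
-- Pre_ excludes negative input, on which both Pythons' while-loops never terminate (n //= 60 stalls at -1).
def Pre_to_simple_babylonian (num : Int) : Prop := 0 ≤ num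
instance (num : Int) : Decidable (Pre_to_simple_babylonian num) := by unfold Pre_to_simple_babylonian; infer_instance
def pvWitness_to_simple_babylonian : Int := 3661

def Spec_to_simple_babylonian (num : Int) (out : String) : Prop := out = to_simple_babylonian_alt num
instance (num : Int) (out : String) : Decidable (Spec_to_simple_babylonian num out) := by unfold Spec_to_simple_babylonian; infer_instance

-- ===== CLAIM (what is proved, stated in full; the proofs are below) =====
def Claim_equal_to_simple_babylonian : Prop := ∀ (num : Int), Dom_to_simple_babylonian num → Pre_to_simple_babylonian num → Spec_to_simple_babylonian num (to_simple_babylonian num)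

-- ===== LEMMAS AND PROOFS =====

-- the two digit-extraction loops compute the same list
theorem bclLoop_eq_altLoop : ∀ (fuel n : Nat) (acc : List Int),
    bclLoop fuel n 60 acc = altLoop fuel n acc := by
  intro fuel
  induction fuel with
  | zero => intro n acc; rfl
  | succ f ih =>
    intro n acc
    simp only [bclLoop, altLoop]
    split_ifs with h
    · rfl
    · exact ih _ _

-- every digit the loop appends is a Nat < 60 (cast to Int)
theorem altLoop_digits_lt : ∀ (fuel n : Nat) (acc : List Int),
    (∀ d ∈ acc, ∃ k : Nat, k < 60 ∧ d = (k : Int)) →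
    ∀ d ∈ altLoop fuel n acc, ∃ k : Nat, k < 60 ∧ d = (k : Int) := by
  intro fuel
  induction fuel with
  | zero => intro n acc hacc; exact hacc
  | succ f ih =>
    intro n acc hacc
    simp only [altLoop]
    split_ifs with h
    · exact hacc
    · refine ih _ _ ?_
      intro d hd
      rcases List.mem_append.mp hd with h1 | h1
      · exact hacc d h1
      · rcases List.mem_singleton.mp h1 with rfl
        exact ⟨n % 60, Nat.mod_lt _ (by omega), rfl⟩

-- the loop only appends: its result extends acc
theorem altLoop_prefix : ∀ (fuel n : Nat) (acc : List Int),
    ∃ rest, altLoop fuel n acc = acc ++ rest := by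
  intro fuel
  induction fuel with
  | zero => intro n acc; exact ⟨[], by simp [altLoop]⟩
  | succ f ih =>
    intro n acc
    simp only [altLoop]
    split_ifs with h
    · exact ⟨[], by simp⟩
    · rcases ih (n / 60) (acc ++ [((n % 60 : Nat) : Int)]) with ⟨rest, hr⟩
      exact ⟨((n % 60 : Nat) : Int) :: rest, by simpa using hr⟩

-- the two per-place renderings agree on every base-60 digit
theorem piece_eq : ∀ k : Nat, k < 60 → aPiece (k : Int) = bPiece (k : Int) := by decide

-- string rendered for a place at a nonzero index
def placeTail (d : Int) : String :=
  if d = 0 then String.ofList [babZERO] else aPiece d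

-- the tail of the output: separator + place string per remaining digit
def tailStr : List Int → String
  | [] => ""
  | d :: rest => ("\u2003" ++ placeTail d) ++ tailStr rest

theorem aFold_tail : ∀ (l : List Int) (k : Int) (acc : String), 1 ≤ k →
    (PySem.List.enumerate l k).foldl aStep acc = acc ++ tailStr l := by
  intro l
  induction l with
  | nil => intro k acc hk; simp [PySem.List.enumerate_nil, tailStr]
  | cons d rest ih =>
    intro k acc hk
    rw [PySem.List.enumerate_cons]
    simp only [List.foldl_cons]
    have hk0 : k ≠ 0 := by omega
    have hstep : aStep acc (k, d) = acc ++ ("\u2003" ++ placeTail d) := by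
      simp only [aStep, placeTail]
      by_cases hd : d = 0 <;> simp [hd, hk0, String.append_assoc]
    rw [hstep, ih (k + 1) _ (by omega), tailStr, String.append_assoc]

theorem bFold_tail : ∀ (l : List Int) (k : Int) (acc : List String), 1 ≤ k →
    (PySem.List.enumerate l k).foldl
        (fun parts id => parts ++ [if id.2 = 0 ∧ id.1 ≠ 0 then String.ofList [babZERO] else bPiece id.2]) acc
      = acc ++ l.map (fun d => if d = 0 then String.ofList [babZERO] else bPiece d) := by
  intro l
  induction l with
  | nil => intro k acc hk; simp [PySem.List.enumerate_nil]
  | cons d rest ih =>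
    intro k acc hk
    rw [PySem.List.enumerate_cons]
    simp only [List.foldl_cons, List.map_cons]
    have hk0 : k ≠ 0 := by omega
    have : (if d = 0 ∧ k ≠ 0 then String.ofList [babZERO] else bPiece d)
         = (if d = 0 then String.ofList [babZERO] else bPiece d) := by
      by_cases hd : d = 0 <;> simp [hd, hk0]
    rw [this, ih (k + 1) _ (by omega)]
    simp

-- Python's sep.join over a nonempty parts list, unrolled
theorem join_cons_tail : ∀ (ps : List String) (p : String),
    PySem.Str.join "\u2003" (p :: ps)
      = p ++ (ps.foldr (fun q t => ("\u2003" ++ q) ++ t) "") := by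
  intro ps
  induction ps with
  | nil => intro p; simp [PySem.Str.join]
  | cons q qs ih =>
    intro p
    have h1 := ih q
    -- join sep (p :: q :: qs) = p ++ sep ++ join sep (q :: qs)
    have h2 : PySem.Str.join "\u2003" (p :: q :: qs)
        = p ++ "\u2003" ++ PySem.Str.join "\u2003" (q :: qs) := by
      apply String.toList_injective
      simp [PySem.Str.join, PySem.Chars.join_cons_cons]
    rw [h2, h1]
    simp [List.foldr, String.append_assoc]

-- tailStr agrees with B's mapped pieces folded, for digit lists all < 60
theorem tailStr_eq : ∀ (l : List Int),
    (∀ d ∈ l, ∃ k : Nat, k < 60 ∧ d = (k : Int)) →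
    tailStr l = (l.map (fun d => if d = 0 then String.ofList [babZERO] else bPiece d)).foldr
        (fun q t => ("\u2003" ++ q) ++ t) "" := by
  intro l
  induction l with
  | nil => intro _; rfl
  | cons d rest ih =>
    intro h
    rcases h d (by simp) with ⟨k, hk, rfl⟩
    simp only [tailStr, List.map_cons, List.foldr_cons, placeTail]
    rw [ih (fun x hx => h x (by simp [hx]))]
    by_cases hd : (k : Int) = 0
    · simp [hd]
    · simp [piece_eq k hk]

-- ===== VERDICT (by name: the statement is the Claim_ definition above) =====
theorem to_simple_babylonian_spec : Claim_equal_to_simple_babylonian := by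
  intro num _hdom hpre
  unfold Spec_to_simple_babylonian
  by_cases h0 : num = 0
  · subst h0; decide
  · have hn : 0 < num.toNat := by
      have : 0 < num := lt_of_le_of_ne hpre (Ne.symm h0)
      omega
    unfold to_simple_babylonian to_simple_babylonian_alt base_conv_list
    rw [if_neg h0, if_neg h0]
    rw [show (60 : Int).toNat = 60 from rfl, bclLoop_eq_altLoop]
    -- the digit list is nonempty
    have hne : altLoop num.toNat num.toNat [] ≠ [] := by
      cases hfuel : num.toNat with
      | zero => omega
      | succ f =>
        simp only [altLoop, if_neg (by omega : ¬ (f + 1 = 0))]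
        rcases altLoop_prefix f ((f + 1) / 60) [((f + 1) % 60 : Nat)] with ⟨rest, hr⟩
        push_cast at hr
        simp [hr]
    have hlt := altLoop_digits_lt num.toNat num.toNat [] (by simp)
    rcases List.exists_cons_of_ne_nil (List.reverse_ne_nil_iff.mpr hne) with ⟨d, l, hdl⟩
    have hmem : ∀ x ∈ d :: l, ∃ k : Nat, k < 60 ∧ x = (k : Int) := by
      intro x hx
      exact hlt x (List.mem_reverse.mp (by rw [hdl]; exact hx))
    rw [hdl, PySem.List.enumerate_cons]
    -- head step on each side
    have hheadA : aStep "" (0, d) = aPiece d := by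
      simp [aStep]
    simp only [List.foldl_cons, zero_add, ne_eq, not_true_eq_false, and_false, if_false,
      List.nil_append, hheadA]
    rw [aFold_tail l 1 _ le_rfl, bFold_tail l 1 _ le_rfl, List.singleton_append, join_cons_tail,
        tailStr_eq l (fun x hx => hmem x (by simp [hx]))]
    rcases hmem d (by simp) with ⟨k, hk, rfl⟩
    rw [piece_eq k hk]
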